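-- pv_equiv track=rewrite | github.com/daghanerdonmez/molecular-simulation-mlp | output-processing/receiver-data-compressor.py | compress_data
-- ===== SOURCE A (Python) =====
-- def compress_data(arr, compression_rate):
--     """Compress an array by summing groups of 'compression_rate' elements."""
--     new_counters = []
--     counter = 0
--     current_sum = 0
--     n = len(arr)
--
--     for i in range(n):
--         if counter % compression_rate == 0 and counter != 0:
--             new_counters.append(current_sum)
--             current_sum = 0
--         current_sum += arr[i]
--         counter += 1
--
--     # Add the last group if there's any remaining data
--     if current_sum > 0:
--         new_counters.append(current_sum)
--
--     return new_counters
-- ===== SOURCE B (Python) =====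
-- def compress_data(arr, compression_rate):
--     """Compress an array by summing groups of 'compression_rate' elements."""
--     if not arr:
--         return []
--     num_groups = (len(arr) + compression_rate - 1) // compression_rate
--     result = []
--     for g in range(num_groups):
--         s = sum(arr[g * compression_rate:(g + 1) * compression_rate])
--         if g < num_groups - 1 or s > 0:
--             result.append(s)
--     return result
-- ===== Notes on version B (the rewrite author's own statement) =====
-- stated objective: faster
-- what changed: Replaces A's per-element streaming loop (running counter, modulo-tested flush, running sum) with a closed-form group count via ceiling division plus per-group slice-and-sum using the built-in sum; Pre_ excludes rate 0 on non-empty input (ZeroDivisionError in both) and negative rates, outside the natural domain of a compression rate, where A's grouping by |rate| is an accident of Python's modulo on negative divisors.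
-- outside the precondition, e.g. on compress_data([1, 2, 3], -2): A returns [3, 3], B returns []; on compress_data([5], 0): A raises ZeroDivisionError, B raises ZeroDivisionError
import Mathlib
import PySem

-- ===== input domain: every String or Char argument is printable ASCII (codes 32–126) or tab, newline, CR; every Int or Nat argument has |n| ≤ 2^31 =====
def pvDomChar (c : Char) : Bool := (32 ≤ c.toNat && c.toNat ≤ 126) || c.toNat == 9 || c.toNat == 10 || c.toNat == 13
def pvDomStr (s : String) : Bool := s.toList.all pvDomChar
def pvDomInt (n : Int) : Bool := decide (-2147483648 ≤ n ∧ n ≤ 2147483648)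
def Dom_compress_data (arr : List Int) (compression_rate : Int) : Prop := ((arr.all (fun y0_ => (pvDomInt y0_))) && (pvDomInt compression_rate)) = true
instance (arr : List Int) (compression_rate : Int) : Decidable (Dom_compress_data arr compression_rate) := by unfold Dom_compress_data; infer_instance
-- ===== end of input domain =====

-- B replaces A's per-element counter/modulo streaming loop by a closed-form group count
-- (ceiling division) plus per-group slice-and-sum with the built-in sum (measured faster by a constant factor).


-- ===== PORT A =====
-- A's loop body: flush current_sum when counter is a non-zero multiple of the rate, then add arr[i].
def compressStep (compression_rate : Int) (st : List Int × Int × Int) (x : Int) : List Int × Int × Int :=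
  let flush := PySem.Int.mod st.2.1 compression_rate = 0 ∧ st.2.1 ≠ 0
  ((if flush then st.1 ++ [st.2.2] else st.1),
   st.2.1 + 1,
   (if flush then 0 else st.2.2) + x)

def compress_data (arr : List Int) (compression_rate : Int) : List Int :=
  let n : Int := arr.length
  let st := (PySem.List.pyRange 0 n 1).foldl
    (fun st i => compressStep compression_rate st (PySem.List.pyGetD arr i 0))
    ([], 0, 0)
  if st.2.2 > 0 then st.1 ++ [st.2.2] else st.1

-- ===== PORT B =====
def compress_data_alt (arr : List Int) (compression_rate : Int) : List Int :=
  if arr = [] then []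
  else
    let numGroups : Int := PySem.Int.floordiv ((arr.length : Int) + compression_rate - 1) compression_rate
    (PySem.List.pyRange 0 numGroups 1).foldl
      (fun result g =>
        let s := (PySem.List.slice arr (some (g * compression_rate)) (some ((g + 1) * compression_rate))).sum
        if g < numGroups - 1 ∨ s > 0 then result ++ [s] else result)
      []

-- ===== PRECONDITION & SPEC =====
-- Pre_ keeps the natural domain of a compression rate: it excludes rate 0 with non-empty input, where
-- A (and B) raise ZeroDivisionError, and negative rates, outside the natural domain of a compression
-- rate, where A's grouping by |rate| is an accident of Python's modulo on negative divisors.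
def Pre_compress_data (arr : List Int) (compression_rate : Int) : Prop :=
  arr = [] ∨ 1 ≤ compression_rate
instance (arr : List Int) (compression_rate : Int) : Decidable (Pre_compress_data arr compression_rate) := by unfold Pre_compress_data; infer_instance

def pvWitness_compress_data : List Int × Int := ([1, 2, 3], 2)

def Spec_compress_data (arr : List Int) (compression_rate : Int) (out : List Int) : Prop := out = compress_data_alt arr compression_rate
instance (arr : List Int) (compression_rate : Int) (out : List Int) : Decidable (Spec_compress_data arr compression_rate out) := by unfold Spec_compress_data; infer_instance

-- ===== CLAIM (what is proved, stated in full; the proofs are below) =====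
def Claim_equal_compress_data : Prop := ∀ (arr : List Int) (compression_rate : Int), Dom_compress_data arr compression_rate → Pre_compress_data arr compression_rate → Spec_compress_data arr compression_rate (compress_data arr compression_rate)

-- ===== LEMMAS AND PROOFS =====

-- Sums of successive k-element chunks of a list (k ≥ 1 in all uses).
def chunkSums (k : Nat) : List Int → List Int
  | [] => []
  | x :: xs => (List.take k (x :: xs)).sum :: chunkSums k (List.drop (k - 1) xs)
termination_by xs => xs.length
decreasing_by simp

theorem chunkSums_nil (k : Nat) : chunkSums k [] = [] := by conv_lhs => unfold chunkSums

theorem chunkSums_cons (k : Nat) (x : Int) (xs : List Int) :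
    chunkSums k (x :: xs) = (List.take k (x :: xs)).sum :: chunkSums k (List.drop (k - 1) xs) := by
  conv_lhs => unfold chunkSums

theorem chunkSums_cons' (k : Nat) (hk : 1 ≤ k) (y : Int) (ys : List Int) :
    chunkSums k (y :: ys) = (y + (ys.take (k - 1)).sum) :: chunkSums k (ys.drop (k - 1)) := by
  rw [chunkSums_cons]
  congr 1
  obtain ⟨m, hm⟩ := Nat.exists_eq_succ_of_ne_zero (show k ≠ 0 by omega)
  rw [hm, List.take_succ_cons, Nat.succ_sub_one, List.sum_cons]

theorem dropLast_append_getLastD {α : Type} (l : List α) :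
    ∀ (d : α), l ≠ [] → l.dropLast ++ [l.getLastD d] = l := by
  induction l with
  | nil => intro d h; exact absurd rfl h
  | cons a t ih =>
    intro d h
    cases t with
    | nil => simp
    | cons b t2 =>
      rw [List.dropLast_cons₂, List.getLastD_cons, List.cons_append, ih a (by simp)]

theorem dropLast_append_getLastD' {α : Type} (a : α) (l : List α) :
    (a :: l).dropLast ++ [l.getLastD a] = a :: l := by
  have h := dropLast_append_getLastD (a :: l) a (by simp)
  rwa [List.getLastD_cons] at h

-- Running A's loop over a stretch where no flush fires just adds the stretch's sum.
theorem noflush (cr : Int) (xs : List Int) :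
    ∀ (nc : List Int) (c s : Int), (∀ j : Nat, j < xs.length → ¬ (cr ∣ (c + j))) →
    xs.foldl (compressStep cr) (nc, c, s) = (nc, c + xs.length, s + xs.sum) := by
  induction xs with
  | nil => intro nc c s _; simp
  | cons x xs ih =>
    intro nc c s h
    have h0 : ¬ (cr ∣ c) := by simpa using h 0 (by simp)
    have hmod : ¬ (PySem.Int.mod c cr = 0) := by
      rw [PySem.Int.mod_eq_zero_iff_dvd]; exact h0
    have hstep : compressStep cr (nc, c, s) x = (nc, c + 1, s + x) := by
      simp [compressStep, hmod]
    rw [List.foldl_cons, hstep, ih nc (c + 1) (s + x) (by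
      intro j hj
      have := h (j + 1) (by simpa using Nat.succ_lt_succ hj)
      push_cast at this ⊢
      convert this using 2
      ring)]
    simp
    constructor
    · ring
    · ring

-- Main invariant of A's loop: starting just after a flush at counter c0 (cr ∣ c0), the run over ys
-- appends every completed chunk sum and leaves the last chunk's sum pending.
theorem A_rest (cr : Int) (hcr : cr ≠ 0) :
    ∀ (ys : List Int) (nc : List Int) (c0 s : Int), 0 ≤ c0 → cr ∣ c0 →
    ys.foldl (compressStep cr) (nc, c0 + 1, s) =
      (nc ++ ((s + (ys.take (cr.natAbs - 1)).sum) :: chunkSums cr.natAbs (ys.drop (cr.natAbs - 1))).dropLast,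
       c0 + 1 + ys.length,
       (chunkSums cr.natAbs (ys.drop (cr.natAbs - 1))).getLastD (s + (ys.take (cr.natAbs - 1)).sum)) := by
  intro ys
  generalize hn : ys.length = n
  induction n using Nat.strong_induction_on generalizing ys with
  | _ n ih =>
  intro nc c0 s hc0 hdvd
  have hk1 : 1 ≤ cr.natAbs := Int.natAbs_pos.mpr hcr
  set k := cr.natAbs with hk
  have hnd : ∀ j : Nat, j < (ys.take (k - 1)).length → ¬ (cr ∣ (c0 + 1 + j)) := by
    intro j hj hdv
    have hjk : j < k - 1 := lt_of_lt_of_le hj (by simp)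
    have h1j : cr ∣ ((1 : Int) + j) := by
      have := Int.dvd_sub hdv hdvd
      simpa [add_sub_cancel_left, add_assoc] using this
    have h2 : k ∣ ((1 : Int) + j).natAbs := Int.natAbs_dvd_natAbs.mpr h1j
    have h3 : ((1 : Int) + j).natAbs = 1 + j := by omega
    rw [h3] at h2
    have := Nat.le_of_dvd (by omega) h2
    omega
  have hsplit : ys.take (k - 1) ++ ys.drop (k - 1) = ys := List.take_append_drop _ _
  conv_lhs => rw [← hsplit]
  rw [List.foldl_append]
  rw [noflush cr (ys.take (k - 1)) nc (c0 + 1) s hnd]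
  by_cases hlen : ys.length ≤ k - 1
  · have htake : ys.take (k - 1) = ys := List.take_of_length_le hlen
    have hdrop : ys.drop (k - 1) = [] := List.drop_eq_nil_of_le hlen
    rw [hdrop, htake]
    simp [chunkSums_nil, hn]
  · rw [not_le] at hlen
    have hne : ys.drop (k - 1) ≠ [] := by
      rw [Ne, List.drop_eq_nil_iff]; omega
    obtain ⟨z, zs, hd⟩ := List.exists_cons_of_ne_nil hne
    have hlt : (ys.take (k - 1)).length = k - 1 := by
      rw [List.length_take]; omega
    have hlenys : ys.length = (k - 1) + 1 + zs.length := by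
      have := congrArg List.length hsplit
      simp [hd] at this; omega
    rw [hd, hlt]
    have hcast : (c0 + 1 + ((k : Int) - 1)) = c0 + k := by ring
    have hcastk : ((k - 1 : Nat) : Int) = (k : Int) - 1 := by
      push_cast [hk1]; ring
    rw [hcastk, hcast]
    have hdvk : cr ∣ ((k : Int)) := Int.dvd_natAbs.mpr dvd_rfl
    have hmod0 : PySem.Int.mod (c0 + k) cr = 0 :=
      (PySem.Int.mod_eq_zero_iff_dvd _ _).mpr (Int.dvd_add hdvd hdvk)
    have hne0 : (c0 + (k : Int)) ≠ 0 := by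
      have : (1 : Int) ≤ (k : Int) := by exact_mod_cast hk1
      omega
    have hstep : compressStep cr (nc, c0 + (k : Int), s + (ys.take (k - 1)).sum) z
        = (nc ++ [s + (ys.take (k - 1)).sum], c0 + (k : Int) + 1, 0 + z) := by
      simp [compressStep, hmod0, hne0]
    rw [List.foldl_cons, hstep]
    have hih := ih zs.length (by omega) zs rfl (nc ++ [s + (ys.take (k - 1)).sum])
      (c0 + (k : Int)) (0 + z) (by positivity) (Int.dvd_add hdvd hdvk)
    rw [hih]
    rw [chunkSums_cons' k (by omega) z zs]
    simp only [Prod.mk.injEq]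
    refine ⟨?_, ?_, ?_⟩
    · rw [List.dropLast_cons₂, List.append_assoc]
      simp
    · have hnn : n = k + zs.length := by omega
      rw [hnn]
      push_cast
      ring
    · rw [List.getLastD_cons]
      simp

theorem chunkSums_step (k : Nat) (hk : 1 ≤ k) (arr : List Int) (h : arr ≠ []) :
    chunkSums k arr = (arr.take k).sum :: chunkSums k (arr.drop k) := by
  obtain ⟨x, xs, rfl⟩ := List.exists_cons_of_ne_nil h
  rw [chunkSums_cons' k hk]
  obtain ⟨m, rfl⟩ := Nat.exists_eq_succ_of_ne_zero (show k ≠ 0 by omega)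
  simp [List.take_succ_cons, List.drop_succ_cons]

theorem slice_chunk (arr : List Int) (g k : Nat) :
    PySem.List.slice arr (some ((g : Int) * k)) (some (((g : Int) + 1) * k))
      = (arr.drop (g * k)).take k := by
  have h1 : ((g : Int) * k) = ((g * k : Nat) : Int) := by push_cast; ring
  have h2 : (((g : Int) + 1) * k) = (((g + 1) * k : Nat) : Int) := by push_cast; ring
  rw [h1, h2, PySem.List.slice_natCast]
  congr 1
  simp [Nat.succ_mul]

-- B's per-group slice sums are exactly the chunk sums.
theorem B_map (k : Nat) (hk : 0 < k) :
    ∀ (q : Nat) (arr : List Int), arr ≠ [] → q * k < arr.length → arr.length ≤ (q + 1) * k →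
    ((PySem.List.pyRange 0 ((q : Int) + 1) 1).map
      (fun g => (PySem.List.slice arr (some (g * (k : Int))) (some ((g + 1) * (k : Int)))).sum)) =
    chunkSums k arr := by
  intro q
  induction q with
  | zero =>
    intro arr hne h1 h2
    rw [show ((0 : Nat) : Int) + 1 = 0 + 1 by norm_num]
    rw [PySem.List.pyRange_one_cons (by norm_num), PySem.List.pyRange_one_eq_nil (le_refl (0 + 1))]
    simp only [List.map_cons, List.map_nil]
    have hs := slice_chunk arr 0 k
    simp only [Nat.cast_zero, Nat.zero_mul, List.drop_zero] at hs
    rw [hs, chunkSums_step k hk arr hne,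
      List.drop_eq_nil_of_le (by omega : arr.length ≤ k), chunkSums_nil]
  | succ q ihq =>
    intro arr hne h1 h2
    have e1 : (q + 1) * k = q * k + k := Nat.succ_mul q k
    have e2 : (q + 1 + 1) * k = (q + 1) * k + k := Nat.succ_mul (q + 1) k
    have hkle : k < arr.length := by omega
    rw [show (((q + 1) : Nat) : Int) + 1 = ((q : Int) + 1) + 1 by push_cast; ring]
    rw [PySem.List.pyRange_one_cons (by positivity)]
    simp only [List.map_cons]
    rw [chunkSums_step k hk arr hne]
    congr 1
    · rw [show ((0 : Int)) = (((0 : Nat)) : Int) by norm_num, slice_chunk arr 0 k]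
      simp
    · have hih := ihq (arr.drop k) (by
          rw [Ne, List.drop_eq_nil_iff]; omega)
        (by rw [List.length_drop]; omega)
        (by rw [List.length_drop]; omega)
      rw [← hih]
      rw [PySem.List.pyRange_one, PySem.List.pyRange_one]
      rw [show ((q : Int) + 1 + 1 - (0 + 1)) = (((q + 1 : Nat)) : Int) by push_cast; ring]
      rw [show ((q : Int) + 1 - 0) = (((q + 1 : Nat)) : Int) by push_cast; ring]
      simp only [Int.toNat_natCast, List.map_map]
      refine List.map_congr_left ?_
      intro t _
      simp only [Function.comp_apply, zero_add]
      have hL := slice_chunk arr (1 + t) k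
      have hR := slice_chunk (arr.drop k) t k
      push_cast at hL hR
      rw [hL, hR, List.drop_drop]
      have e3 : (1 + t) * k = k + t * k := by
        rw [Nat.add_mul, Nat.one_mul]
      rw [e3]

theorem A_char (arr : List Int) (cr : Int) (hcr : cr ≠ 0) :
    compress_data arr cr =
      if (chunkSums cr.natAbs arr).getLastD 0 > 0
      then chunkSums cr.natAbs arr
      else (chunkSums cr.natAbs arr).dropLast := by
  have hk1 : 1 ≤ cr.natAbs := Int.natAbs_pos.mpr hcr
  rcases arr with _ | ⟨y, ys⟩
  · simp [compress_data, chunkSums_nil, PySem.List.pyRange_one_eq_nil]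
  · simp only [compress_data]
    rw [PySem.List.foldl_pyRange_zero_pyGetD' (y :: ys) 0 (compressStep cr) ([], 0, 0)]
    rw [List.foldl_cons]
    have hstep0 : compressStep cr ([], 0, 0) y = ([], 0 + 1, 0 + y) := by
      simp [compressStep]
    rw [hstep0, A_rest cr hcr ys [] 0 (0 + y) le_rfl (dvd_zero cr)]
    rw [chunkSums_cons' cr.natAbs hk1 y ys, List.getLastD_cons]
    simp only [zero_add, List.nil_append]
    by_cases hpos : (chunkSums cr.natAbs (ys.drop (cr.natAbs - 1))).getLastD (y + (ys.take (cr.natAbs - 1)).sum) > 0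
    · simp only [hpos, if_pos]
      exact dropLast_append_getLastD' _ _
    · simp only [hpos, if_false]

-- B equals the same characterisation for a positive rate.
theorem B_char (arr : List Int) (cr : Int) (hcr : 1 ≤ cr) :
    compress_data_alt arr cr =
      if (chunkSums cr.natAbs arr).getLastD 0 > 0
      then chunkSums cr.natAbs arr
      else (chunkSums cr.natAbs arr).dropLast := by
  by_cases harr : arr = []
  · subst harr; simp [compress_data_alt, chunkSums_nil]
  · simp only [compress_data_alt, if_neg harr]
    set k := cr.natAbs with hkdef
    have hk1 : 1 ≤ k := Int.natAbs_pos.mpr (by omega)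
    have hcrk : cr = (k : Int) := by omega
    have hlen1 : 1 ≤ arr.length := List.length_pos_of_ne_nil harr
    obtain ⟨q0, r, hdm, hml⟩ : ∃ q0 r, arr.length - 1 = k * q0 + r ∧ r < k :=
      ⟨(arr.length - 1) / k, (arr.length - 1) % k, (Nat.div_add_mod _ _).symm,
        Nat.mod_lt _ (by omega)⟩
    have hb1 : q0 * k < arr.length := by
      have := Nat.mul_comm q0 k; omega
    have hb2 : arr.length ≤ (q0 + 1) * k := by
      have e : (q0 + 1) * k = q0 * k + k := Nat.succ_mul q0 k
      have := Nat.mul_comm q0 k; omega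
    have hng : PySem.Int.floordiv ((arr.length : Int) + cr - 1) cr = (q0 : Int) + 1 := by
      rw [PySem.Int.floordiv_eq_iff_of_pos (by omega)]
      have g1 : ((q0 : Int)) * k < arr.length := by exact_mod_cast hb1
      have g2 : (arr.length : Int) ≤ ((q0 : Int) + 1) * k := by exact_mod_cast hb2
      rw [hcrk]
      constructor
      · nlinarith
      · nlinarith
    rw [hng]
    -- the fold appends the group sum unless it is the last group with a non-positive sum
    rw [PySem.List.foldl_append_ite
      (p := fun g => g < (q0 : Int) + 1 - 1 ∨
        (PySem.List.slice arr (some (g * cr)) (some ((g + 1) * cr))).sum > 0)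
      (f := fun g => (PySem.List.slice arr (some (g * cr)) (some ((g + 1) * cr))).sum)]
    rw [List.nil_append]
    have hmap := B_map k (by omega) q0 arr harr hb1 hb2
    rw [hcrk]
    have hsplit : PySem.List.pyRange 0 ((q0 : Int) + 1) 1
        = PySem.List.pyRange 0 (q0 : Int) 1 ++ [(q0 : Int)] :=
      PySem.List.pyRange_one_succ_right (by positivity)
    rw [hsplit] at hmap ⊢
    rw [List.filter_append, List.map_append]
    have hpre : (PySem.List.pyRange 0 (q0 : Int) 1).filter
        (fun g => decide (g < (q0 : Int) + 1 - 1 ∨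
          (PySem.List.slice arr (some (g * (k : Int))) (some ((g + 1) * (k : Int)))).sum > 0))
        = PySem.List.pyRange 0 (q0 : Int) 1 := by
      apply List.filter_eq_self.mpr
      intro g hg
      have := (PySem.List.mem_pyRange_one).mp hg
      simp only [decide_eq_true_eq]
      left; omega
    rw [hpre]
    rw [List.map_append] at hmap
    simp only [List.map_cons, List.map_nil] at hmap
    set pref := (PySem.List.pyRange 0 (q0 : Int) 1).map
      (fun g => (PySem.List.slice arr (some (g * (k : Int))) (some ((g + 1) * (k : Int)))).sum) with hpref
    set slast := (PySem.List.slice arr (some ((q0 : Int) * (k : Int)))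
      (some (((q0 : Int) + 1) * (k : Int)))).sum with hslast
    have hdrop : (chunkSums k arr).dropLast = pref := by
      rw [← hmap]; exact List.dropLast_concat ..
    have hlast : (chunkSums k arr).getLastD 0 = slast := by
      rw [← hmap]; exact List.getLastD_concat ..
    rw [hlast, hdrop]
    by_cases hs : slast > 0
    · rw [if_pos hs]
      have hd : decide ((q0 : Int) < (q0 : Int) + 1 - 1 ∨
          (PySem.List.slice arr (some ((q0 : Int) * (k : Int)))
            (some (((q0 : Int) + 1) * (k : Int)))).sum > 0) = true := by
        simp only [decide_eq_true_eq]
        right; rw [← hslast]; exact hs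
      rw [List.filter_singleton, hd]
      simp only [cond_true, List.map_cons, List.map_nil]
      exact hmap
    · rw [if_neg hs]
      have hd : decide ((q0 : Int) < (q0 : Int) + 1 - 1 ∨
          (PySem.List.slice arr (some ((q0 : Int) * (k : Int)))
            (some (((q0 : Int) + 1) * (k : Int)))).sum > 0) = false := by
        simp only [decide_eq_false_iff_not]
        rw [← hslast]
        exact fun h => h.elim (by omega) hs
      rw [List.filter_singleton, hd]
      simp only [cond_false, List.map_nil, List.append_nil]

-- ===== VERDICT (by name: the statement is the Claim_ definition above) =====
theorem compress_data_spec : Claim_equal_compress_data := by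
  intro arr cr _hdom hpre
  unfold Spec_compress_data
  rcases hpre with h | h
  · subst h; rfl
  · rw [A_char arr cr (by omega), B_char arr cr h]
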